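-- pv_equiv track=rewrite | github.com/Sixshaman/SolarTears | UtilsBuild/GenerateOGLFunctionList.py | compile_wgl_function_list_h
-- ===== SOURCE A (Python) =====
-- end_gl_function_list_h = """\
-- }"""
--
-- start_wgl_function_list_h = """\
-- #pragma once
--
-- #include <Windows.h>
-- #include <GL/GL.h>
-- #include <GL/wgl.h>
-- #include <GL/wglext.h>
--
-- #define DECLARE_WGL_FUNCTION(type, name) extern type name;
--
-- extern "C"
-- {"""
--
-- def func_type_from_name(func_name):
-- 	return "PFN" + func_name.upper() + "PROC"
--
-- def create_function_wgl_declarations(func_names, use_extension_indent):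
-- 	cpp_declarations = ""
--
-- 	max_len = max([len(func_type_from_name(func_name)) for func_name in func_names])
-- 	for func_name in func_names:
-- 		func_type = func_type_from_name(func_name)
--
-- 		if use_extension_indent:
-- 			cpp_declarations += "\t"
--
-- 		cpp_declarations += "DECLARE_WGL_FUNCTION("
-- 		cpp_declarations += func_type
-- 		cpp_declarations += ","
-- 		cpp_declarations += (max_len - len(func_type) + 1) * ' '
-- 		cpp_declarations += func_name
-- 		cpp_declarations += ")"
-- 		cpp_declarations += "\n"
--
-- 	return cpp_declarations
--
-- def compile_wgl_function_list_h(funcs):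
-- 	cpp_data = ""
--
-- 	cpp_data += start_wgl_function_list_h
--
-- 	current_extension = ""
-- 	current_indent_functions = []
-- 	for func in funcs:
-- 		func_name      = func[0]
-- 		func_extension = func[2]
--
-- 		if func_extension != current_extension:
-- 			if current_extension != "":
-- 				cpp_data += create_function_wgl_declarations(current_indent_functions, True)
-- 				current_indent_functions.clear()
--
-- 				cpp_data += "#endif"
-- 				cpp_data += "\n"
--
-- 			current_extension = func_extension
--
-- 			if current_extension != "":
-- 				cpp_data += "\n#ifdef " + func_extension + "\n"
--
-- 		if current_extension != "":
-- 			current_indent_functions.append(func_name)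
--
-- 	if current_extension != "":
-- 		cpp_data += create_function_wgl_declarations(current_indent_functions, current_extension != "")
-- 		cpp_data += "#endif\n"
--
-- 	cpp_data += end_gl_function_list_h
--
-- 	return cpp_data
-- ===== SOURCE B (Python) =====
-- end_gl_function_list_h = """\
-- }"""
--
-- start_wgl_function_list_h = """\
-- #pragma once
--
-- #include <Windows.h>
-- #include <GL/GL.h>
-- #include <GL/wgl.h>
-- #include <GL/wglext.h>
--
-- #define DECLARE_WGL_FUNCTION(type, name) extern type name;
--
-- extern "C"
-- {"""
--
-- def func_type_from_name(func_name):
-- 	return "PFN" + func_name.upper() + "PROC"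
--
-- def create_function_wgl_declarations(func_names, use_extension_indent):
-- 	cpp_declarations = ""
--
-- 	max_len = max([len(func_type_from_name(func_name)) for func_name in func_names])
-- 	for func_name in func_names:
-- 		func_type = func_type_from_name(func_name)
--
-- 		if use_extension_indent:
-- 			cpp_declarations += "\t"
--
-- 		cpp_declarations += "DECLARE_WGL_FUNCTION("
-- 		cpp_declarations += func_type
-- 		cpp_declarations += ","
-- 		cpp_declarations += (max_len - len(func_type) + 1) * ' '
-- 		cpp_declarations += func_name
-- 		cpp_declarations += ")"
-- 		cpp_declarations += "\n"
--
-- 	return cpp_declarations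
--
-- def compile_wgl_function_list_h(funcs):
-- 	# Phase 1: split funcs into maximal consecutive runs sharing one extension.
-- 	runs = []
-- 	for name, _, ext in funcs:
-- 		if runs and runs[-1][0] == ext:
-- 			runs[-1][1].append(name)
-- 		else:
-- 			runs.append((ext, [name]))
-- 	# Phase 2: render each non-empty-extension run as one #ifdef block.
-- 	body = "".join(
-- 		"\n#ifdef " + ext + "\n"
-- 		+ create_function_wgl_declarations(names, True)
-- 		+ "#endif\n"
-- 		for ext, names in runs if ext != ""
-- 	)
-- 	return start_wgl_function_list_h + body + end_gl_function_list_h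
-- ===== Notes on version B (the rewrite author's own statement) =====
-- stated objective: simpler
-- what changed: Replaces A's single-pass state machine (pending extension, pending name buffer, deferred flushes mid-loop and after the loop) with two plain phases: group funcs into consecutive runs by extension, then join one rendered #ifdef block per non-empty-extension run.
import Mathlib
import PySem

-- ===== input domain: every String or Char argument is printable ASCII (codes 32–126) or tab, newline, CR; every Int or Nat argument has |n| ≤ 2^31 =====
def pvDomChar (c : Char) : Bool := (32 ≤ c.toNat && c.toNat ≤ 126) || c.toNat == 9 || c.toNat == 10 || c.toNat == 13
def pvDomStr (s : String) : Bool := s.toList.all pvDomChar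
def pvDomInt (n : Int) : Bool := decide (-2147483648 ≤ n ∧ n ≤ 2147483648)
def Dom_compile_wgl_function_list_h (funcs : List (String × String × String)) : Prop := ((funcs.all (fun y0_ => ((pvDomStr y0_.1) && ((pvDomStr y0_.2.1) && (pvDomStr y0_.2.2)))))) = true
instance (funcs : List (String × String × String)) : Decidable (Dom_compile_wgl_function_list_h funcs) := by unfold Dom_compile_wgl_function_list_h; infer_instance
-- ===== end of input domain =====

-- B replaces A's in-loop state machine by grouping funcs into consecutive extension runs and
-- joining one rendered block per non-empty-extension run (objective: simpler decomposition).

-- ===== PORT A =====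
def pvEndH : String := "}"

def pvStartH : String := "#pragma once\n\n#include <Windows.h>\n#include <GL/GL.h>\n#include <GL/wgl.h>\n#include <GL/wglext.h>\n\n#define DECLARE_WGL_FUNCTION(type, name) extern type name;\n\nextern \"C\"\n{"

def pvFuncType (func_name : String) : String := "PFN" ++ PySem.Str.upper func_name ++ "PROC"

-- create_function_wgl_declarations; Python's max(...) raises on an empty list, which the entry
-- function never produces — the port returns 0 there (unreachable from the entry points).
def pvCreateDecls (func_names : List String) (use_extension_indent : Bool) : String :=
  let max_len : Int := ((func_names.map (fun n => PySem.Str.len (pvFuncType n))).max?).getD 0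
  func_names.foldl (fun cpp_declarations func_name =>
    let func_type := pvFuncType func_name
    let cpp_declarations := if use_extension_indent then cpp_declarations ++ "\t" else cpp_declarations
    cpp_declarations ++ "DECLARE_WGL_FUNCTION(" ++ func_type ++ ","
      ++ String.ofList (List.replicate (max_len - PySem.Str.len func_type + 1).toNat ' ')
      ++ func_name ++ ")" ++ "\n") ""

def pvStepA (st : String × String × List String) (func : String × String × String) :
    String × String × List String :=
  let func_name := func.1
  let func_extension := func.2.2
  let st :=
    if func_extension ≠ st.2.1 then
      let st :=
        if st.2.1 ≠ "" then
          (st.1 ++ pvCreateDecls st.2.2 true ++ "#endif" ++ "\n", st.2.1, ([] : List String))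
        else st
      let st := (st.1, func_extension, st.2.2)
      if st.2.1 ≠ "" then (st.1 ++ "\n#ifdef " ++ func_extension ++ "\n", st.2.1, st.2.2) else st
    else st
  if st.2.1 ≠ "" then (st.1, st.2.1, st.2.2 ++ [func_name]) else st

def compile_wgl_function_list_h (funcs : List (String × String × String)) : String :=
  let st := funcs.foldl pvStepA (pvStartH, "", ([] : List String))
  let cpp_data :=
    if st.2.1 ≠ "" then st.1 ++ pvCreateDecls st.2.2 (decide (st.2.1 ≠ "")) ++ "#endif\n" else st.1
  cpp_data ++ pvEndH

-- ===== PORT B =====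
-- runs[-1][1].append(name) / runs.append((ext,[name])) from Source B's phase 1
def pvAddRun (runs : List (String × List String)) (ext name : String) :
    List (String × List String) :=
  match runs.getLast? with
  | some last =>
      if last.1 == ext then runs.dropLast ++ [(last.1, last.2 ++ [name])]
      else runs ++ [(ext, [name])]
  | none => [(ext, [name])]

-- one generator element of Source B's "".join(...): a rendered block, or nothing for ext == ""
def pvRenderRun (run : String × List String) : String :=
  if run.1 ≠ "" then "\n#ifdef " ++ run.1 ++ "\n" ++ pvCreateDecls run.2 true ++ "#endif\n"
  else ""

def compile_wgl_function_list_h_alt (funcs : List (String × String × String)) : String :=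
  let runs := funcs.foldl (fun runs f => pvAddRun runs f.2.2 f.1) []
  let body := String.join (((runs.filter (fun r => r.1 ≠ "")).map pvRenderRun))
  pvStartH ++ body ++ pvEndH

-- ===== PRECONDITION & SPEC =====
def Spec_compile_wgl_function_list_h (funcs : List (String × String × String)) (out : String) : Prop := out = compile_wgl_function_list_h_alt funcs
instance (funcs : List (String × String × String)) (out : String) : Decidable (Spec_compile_wgl_function_list_h funcs out) := by unfold Spec_compile_wgl_function_list_h; infer_instance

-- ===== CLAIM (what is proved, stated in full; the proofs are below) =====
def Claim_equal_compile_wgl_function_list_h : Prop := ∀ (funcs : List (String × String × String)), Dom_compile_wgl_function_list_h funcs → Spec_compile_wgl_function_list_h funcs (compile_wgl_function_list_h funcs)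

-- ===== LEMMAS AND PROOFS =====

-- text A appends when it closes the currently open #ifdef block (nothing if no block is open)
def pvClose (e : String) (fns : List String) : String :=
  if e ≠ "" then pvCreateDecls fns true ++ "#endif" ++ "\n" else ""

-- text A appends when it opens a block for extension e (nothing for e = "")
def pvHeader (e : String) : String := if e ≠ "" then "\n#ifdef " ++ e ++ "\n" else ""

-- common recursive characterisation: the text still to be emitted, given the open block (e, fns)
def pvG (e : String) (fns : List String) : List (String × String × String) → String
  | [] => pvClose e fns
  | f :: rest =>
      if f.2.2 = e then pvG e (if e ≠ "" then fns ++ [f.1] else fns) rest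
      else pvClose e fns ++ pvHeader f.2.2 ++ pvG f.2.2 (if f.2.2 ≠ "" then [f.1] else []) rest

lemma pvClose_empty (fns : List String) : pvClose "" fns = "" := by simp [pvClose]

lemma pvG_empty (rest : List (String × String × String)) (fns fns' : List String) :
    pvG "" fns rest = pvG "" fns' rest := by
  induction rest generalizing fns fns' with
  | nil => simp [pvG, pvClose]
  | cons f rest ih =>
    by_cases h : f.2.2 = ""
    · simp only [pvG, if_pos h]
      simpa using ih _ _
    · simp [pvG, h, pvClose_empty]

lemma pv_lit_merge (x : String) : "#endif\n" ++ ("\n#ifdef " ++ x) = "#endif\n\n#ifdef " ++ x := by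
  rw [← String.append_assoc]; rfl

def pvFinal (st : String × String × List String) : String :=
  if st.2.1 ≠ "" then st.1 ++ pvCreateDecls st.2.2 (decide (st.2.1 ≠ "")) ++ "#endif\n" else st.1

lemma pvStepA_same (cpp e : String) (fns : List String) (f : String × String × String)
    (h : f.2.2 = e) :
    pvStepA (cpp, e, fns) f = (cpp, e, if e ≠ "" then fns ++ [f.1] else fns) := by
  simp only [pvStepA, h]
  split_ifs <;> simp_all

lemma pvStepA_from_empty (cpp : String) (fns : List String) (f : String × String × String)
    (h : f.2.2 ≠ "") :
    pvStepA (cpp, "", fns) f = (cpp ++ "\n#ifdef " ++ f.2.2 ++ "\n", f.2.2, fns ++ [f.1]) := by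
  simp [pvStepA, h]

lemma pvStepA_to_empty (cpp e : String) (fns : List String) (f : String × String × String)
    (he : e ≠ "") (h : f.2.2 = "") :
    pvStepA (cpp, e, fns) f = (cpp ++ pvCreateDecls fns true ++ "#endif" ++ "\n", "", []) := by
  simp [pvStepA, he, h]

lemma pvStepA_switch (cpp e : String) (fns : List String) (f : String × String × String)
    (he : e ≠ "") (hx : f.2.2 ≠ "") (hne : f.2.2 ≠ e) :
    pvStepA (cpp, e, fns) f =
      (cpp ++ pvCreateDecls fns true ++ "#endif" ++ "\n" ++ "\n#ifdef " ++ f.2.2 ++ "\n",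
       f.2.2, [f.1]) := by
  simp [pvStepA, he, hx, hne]

lemma pvA_loop (rest : List (String × String × String)) :
    ∀ (cpp e : String) (fns : List String), (e = "" → fns = []) →
      pvFinal (rest.foldl pvStepA (cpp, e, fns)) = cpp ++ pvG e fns rest := by
  induction rest with
  | nil =>
    intro cpp e fns _
    by_cases h : e = ""
    · simp [pvFinal, pvG, pvClose, h]
    · simp [pvFinal, pvG, pvClose, h, String.append_assoc]
  | cons f rest ih =>
    intro cpp e fns h0
    simp only [List.foldl_cons]
    by_cases hfe : f.2.2 = e
    · rw [pvStepA_same cpp e fns f hfe]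
      rw [ih _ _ _ (by intro he; simp [he]; exact h0 he)]
      simp only [pvG, if_pos hfe]
    · by_cases he : e = ""
      · subst he
        have hx : f.2.2 ≠ "" := hfe
        rw [pvStepA_from_empty cpp fns f hx]
        rw [ih _ _ _ (by intro h; exact absurd h hx)]
        rw [h0 rfl]
        simp [pvG, hfe, pvClose, pvHeader, String.append_assoc]
      · by_cases hx : f.2.2 = ""
        · rw [pvStepA_to_empty cpp e fns f he hx]
          rw [ih _ _ _ (fun _ => rfl)]
          simp [pvG, he, hx, pvClose, pvHeader, String.append_assoc]
        · rw [pvStepA_switch cpp e fns f he hx hfe]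
          rw [ih _ _ _ (by intro h; exact absurd h hx)]
          simp [pvG, hfe, he, hx, pvClose, pvHeader, String.append_assoc, pv_lit_merge]

def pvBody (runs : List (String × List String)) : String :=
  String.join ((runs.filter (fun r => r.1 ≠ "")).map pvRenderRun)

lemma pvBody_concat (runs : List (String × List String)) (r : String × List String) :
    pvBody (runs ++ [r]) = pvBody runs ++ pvRenderRun r := by
  by_cases h : r.1 = "" <;>
    simp [pvBody, pvRenderRun, h, String.join, List.filter_append]

lemma pvRenderRun_eq (r : String × List String) :
    pvRenderRun r = pvHeader r.1 ++ pvClose r.1 r.2 := by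
  by_cases h : r.1 = "" <;> simp [pvRenderRun, pvHeader, pvClose, h, String.append_assoc]

lemma pvB_loop (rest : List (String × String × String)) :
    ∀ (runs : List (String × List String)),
      pvBody (rest.foldl (fun runs f => pvAddRun runs f.2.2 f.1) runs)
      = pvBody runs.dropLast ++ pvHeader ((runs.getLast?.map (·.1)).getD "")
          ++ pvG ((runs.getLast?.map (·.1)).getD "") ((runs.getLast?.map (·.2)).getD []) rest := by
  induction rest with
  | nil =>
    intro runs
    rcases List.eq_nil_or_concat runs with h | ⟨l, r, h⟩ <;> subst h
    · simp [pvBody, pvG, pvClose, pvHeader]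
    · simp only [List.concat_eq_append, List.foldl_nil, List.getLast?_concat, List.dropLast_concat, Option.map_some, Option.getD_some]
      rw [pvBody_concat, pvRenderRun_eq]
      simp only [pvG, String.append_assoc]
  | cons f rest ih =>
    intro runs
    simp only [List.foldl_cons]
    rcases List.eq_nil_or_concat runs with h | ⟨l, r, h⟩ <;> subst h
    · rw [show pvAddRun [] f.2.2 f.1 = [(f.2.2, [f.1])] from rfl, ih]
      simp only [List.getLast?_nil, List.dropLast_nil, Option.map_none, Option.getD_none]
      by_cases hx : f.2.2 = ""
      · simp only [List.getLast?_cons, List.getLast?_nil]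
        simp [pvG, pvHeader, pvBody, hx]
        exact pvG_empty rest [f.1] []
      · simp only [List.getLast?_cons, List.getLast?_nil]
        simp [pvG, pvHeader, pvBody, pvClose, hx, String.append_assoc]
    · simp only [List.concat_eq_append]
      by_cases heq : r.1 = f.2.2
      · rw [show pvAddRun (l ++ [r]) f.2.2 f.1 = l ++ [(r.1, r.2 ++ [f.1])] by
          simp [pvAddRun, heq]]
        rw [ih]
        simp only [List.getLast?_concat, List.dropLast_concat, Option.map_some, Option.getD_some]
        simp only [pvG, heq.symm, if_pos]
        by_cases hr : r.1 = ""
        · simp only [hr, ne_eq, not_true_eq_false, ite_false]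
          rw [pvG_empty rest (r.2 ++ [f.1]) r.2]
        · simp [hr]
      · rw [show pvAddRun (l ++ [r]) f.2.2 f.1 = (l ++ [r]) ++ [(f.2.2, [f.1])] by
          simp [pvAddRun, heq]]
        rw [ih]
        simp only [List.getLast?_concat, List.dropLast_concat, Option.map_some, Option.getD_some]
        rw [pvBody_concat, pvRenderRun_eq]
        have hstep : pvG r.1 r.2 (f :: rest)
            = pvClose r.1 r.2 ++ pvHeader f.2.2 ++ pvG f.2.2 (if f.2.2 ≠ "" then [f.1] else []) rest := by
          simp only [pvG]
          rw [if_neg (fun h => heq h.symm)]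
        rw [hstep]
        by_cases hx : f.2.2 = ""
        · simp only [hx, ne_eq, not_true_eq_false, ite_false]
          rw [pvG_empty rest [f.1] []]
          simp [pvHeader, String.append_assoc]
        · simp [hx, String.append_assoc]

-- ===== VERDICT (by name: the statement is the Claim_ definition above) =====
theorem compile_wgl_function_list_h_spec : Claim_equal_compile_wgl_function_list_h := by
  intro funcs _
  unfold Spec_compile_wgl_function_list_h
  show compile_wgl_function_list_h funcs = compile_wgl_function_list_h_alt funcs
  unfold compile_wgl_function_list_h compile_wgl_function_list_h_alt
  have ha := pvA_loop funcs pvStartH "" [] (fun _ => rfl)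
  have hb := pvB_loop funcs []
  simp only [pvFinal] at ha
  simp only [pvBody] at hb
  dsimp only
  rw [ha, hb]
  simp [pvHeader, String.join, String.append_assoc]
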